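-- pv_equiv track=rewrite | github.com/Her-shey/TopoMap-Python | Topomap.py | sortEdges
-- ===== SOURCE A (Python) =====
-- def sortEdges(weights):
--     weights_list = []
--     for idx in range(len(weights)):
--         weights_list.append([weights[idx], idx])
--     weights_list.sort(key = lambda x: x[0])
--     weights.sort()
--     order = []
--     for idx in range(len(weights)):
--         order.append(weights_list[idx].pop())
--     return order
-- ===== SOURCE B (Python) =====
-- def sortEdges(weights):
--     # Hand-written top-down merge sort of the indices themselves, merging by the
--     # (weight, index) order so ties keep the earlier index first; no pair list is
--     # materialised and no built-in sort produces the returned order.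
--     def merge(l, r):
--         out = []
--         a = 0
--         b = 0
--         while a < len(l) and b < len(r):
--             i = l[a]
--             j = r[b]
--             if (weights[i], i) <= (weights[j], j):
--                 out.append(i)
--                 a += 1
--             else:
--                 out.append(j)
--                 b += 1
--         out.extend(l[a:])
--         out.extend(r[b:])
--         return out
--
--     def msort(idxs):
--         if len(idxs) <= 1:
--             return idxs
--         mid = len(idxs) // 2
--         return merge(msort(idxs[:mid]), msort(idxs[mid:]))
--
--     order = msort(list(range(len(weights))))
--     weights.sort()  # same in-place side effect as A
--     return order
-- ===== Notes on version B (the rewrite author's own statement) =====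
-- stated objective: alternative
-- what changed: A decorates into [weight, idx] pairs, runs two built-in sorts (the pair sort plus a separate in-place weights.sort()) and pops the indices back out; B computes the argsort order by a hand-written top-down merge sort over the index list, merging by (weight, index) so ties keep the earlier index, with no pair list and no built-in sort producing the returned value.
import Mathlib
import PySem

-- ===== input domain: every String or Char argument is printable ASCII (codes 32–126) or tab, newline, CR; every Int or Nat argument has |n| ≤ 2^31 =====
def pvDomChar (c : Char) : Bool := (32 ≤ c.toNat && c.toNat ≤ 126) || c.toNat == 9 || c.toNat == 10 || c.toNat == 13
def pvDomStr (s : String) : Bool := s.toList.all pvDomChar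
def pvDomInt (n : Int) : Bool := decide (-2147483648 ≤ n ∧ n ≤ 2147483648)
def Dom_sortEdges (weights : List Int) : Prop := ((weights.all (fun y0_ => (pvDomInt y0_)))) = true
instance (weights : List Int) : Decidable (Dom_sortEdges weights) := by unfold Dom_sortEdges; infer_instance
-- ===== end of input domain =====

-- B replaces A's pair-decorate / two built-in sorts / pop loop by a hand-written top-down
-- merge sort over the index list (objective: alternative; no speed claim).
-- Both Pythons also sort `weights` in place identically; the equivalence proved here is about the RETURN value.

-- ===== PORT A =====
def sortEdges (weights : List Int) : List Int :=
  -- weights_list = []; for idx in range(len(weights)): weights_list.append([weights[idx], idx])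
  -- weights_list.sort(key = lambda x: x[0])
  -- (weights[idx] is always in range here, so pyGetD is exact)
  let weightsList : List (Int × Int) :=
    PySem.List.sorted
      ((PySem.List.pyRange 0 (weights.length : Int) 1).foldl
        (fun acc idx => acc ++ [(PySem.List.pyGetD weights idx 0, idx)]) [])
      (fun x => x.1) false
  -- weights.sort()  (in-place mutation of the caller's list; does not affect the returned value)
  let _sortedWeights := PySem.List.sorted weights (fun w => w) false
  -- order = []; for idx in range(len(weights)): order.append(weights_list[idx].pop())
  (PySem.List.pyRange 0 (weights.length : Int) 1).foldl
    (fun acc idx => acc ++ [(PySem.List.pyGetD weightsList idx (0, 0)).2]) []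

-- ===== PORT B =====
-- the Python tuple (weights[i], i) that B's merge compares (tuple <= is lexicographic = Prod.Lex;
-- the indices in play are always in range, so pyGetD is exact)
def keyB (weights : List Int) (i : Int) : Lex (Int × Int) :=
  toLex (PySem.List.pyGetD weights i 0, i)

-- B's merge(l, r): the while loop over the two cursors as its obvious structural recursion;
-- the out.extend(...) leftovers are the first two equations
def mergeB (weights : List Int) : List Int → List Int → List Int
  | [], r => r
  | i :: l, [] => i :: l
  | i :: l, j :: r =>
      if keyB weights i ≤ keyB weights j then i :: mergeB weights l (j :: r)
      else j :: mergeB weights (i :: l) r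
termination_by l r => l.length + r.length

-- B's msort(idxs): idxs[:mid] / idxs[mid:] with mid = len(idxs)//2 ≥ 0 are take/drop
-- (exact by PySem.List.slice_to_natCast / slice_from_natCast)
def msortB (weights : List Int) (idxs : List Int) : List Int :=
  if h : idxs.length ≤ 1 then idxs
  else
    mergeB weights (msortB weights (idxs.take (idxs.length / 2)))
      (msortB weights (idxs.drop (idxs.length / 2)))
termination_by idxs.length
decreasing_by
  · simp only [List.length_take]; omega
  · simp only [List.length_drop]; omega

def sortEdges_alt (weights : List Int) : List Int :=
  -- order = msort(list(range(len(weights))))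
  let order := msortB weights (PySem.List.pyRange 0 (weights.length : Int) 1)
  -- weights.sort()  (in-place mutation of the caller's list; does not affect the returned value)
  let _sortedWeights := PySem.List.sorted weights (fun w => w) false
  order

-- ===== PRECONDITION & SPEC =====
def Spec_sortEdges (weights : List Int) (out : List Int) : Prop := out = sortEdges_alt weights
instance (weights : List Int) (out : List Int) : Decidable (Spec_sortEdges weights out) := by unfold Spec_sortEdges; infer_instance

-- ===== CLAIM (what is proved, stated in full; the proofs are below) =====
def Claim_equal_sortEdges : Prop := ∀ (weights : List Int), Dom_sortEdges weights → Spec_sortEdges weights (sortEdges weights)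

-- ===== LEMMAS AND PROOFS =====

-- ---- B side: the merge sort returns the strictly keyB-increasing rearrangement ----

theorem mergeB_perm (weights : List Int) (l r : List Int) :
    (mergeB weights l r).Perm (l ++ r) := by
  fun_induction mergeB weights l r with
  | case1 r => simp
  | case2 i l => simp
  | case3 i l j r h ih => exact (ih.cons i)
  | case4 i l j r h ih => exact (ih.cons j).trans List.perm_middle.symm

theorem mergeB_pairwise (weights : List Int) (l r : List Int)
    (hl : l.Pairwise (fun a b => keyB weights a ≤ keyB weights b))
    (hr : r.Pairwise (fun a b => keyB weights a ≤ keyB weights b)) :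
    (mergeB weights l r).Pairwise (fun a b => keyB weights a ≤ keyB weights b) := by
  fun_induction mergeB weights l r with
  | case1 r => exact hr
  | case2 i l => exact hl
  | case3 i l j r h ih =>
      rcases List.pairwise_cons.mp hl with ⟨hil, hl'⟩
      rcases List.pairwise_cons.mp hr with ⟨hjr, hr'⟩
      refine List.pairwise_cons.mpr ⟨?_, ih hl' hr⟩
      intro x hx
      rcases List.mem_append.mp ((mergeB_perm weights l (j :: r)).mem_iff.mp hx) with hxl | hxr
      · exact hil x hxl
      · rcases List.mem_cons.mp hxr with rfl | hxr'
        · exact h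
        · exact le_trans h (hjr x hxr')
  | case4 i l j r h ih =>
      rcases List.pairwise_cons.mp hl with ⟨hil, hl'⟩
      rcases List.pairwise_cons.mp hr with ⟨hjr, hr'⟩
      have hji : keyB weights j ≤ keyB weights i := (not_le.mp h).le
      refine List.pairwise_cons.mpr ⟨?_, ih hl hr'⟩
      intro x hx
      rcases List.mem_append.mp ((mergeB_perm weights (i :: l) r).mem_iff.mp hx) with hxl | hxr
      · rcases List.mem_cons.mp hxl with rfl | hxl'
        · exact hji
        · exact le_trans hji (hil x hxl')
      · exact hjr x hxr

theorem msortB_perm (weights : List Int) : ∀ (n : Nat) (idxs : List Int),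
    idxs.length ≤ n → (msortB weights idxs).Perm idxs := by
  intro n
  induction n with
  | zero =>
      intro idxs hn
      have : idxs = [] := List.length_eq_zero_iff.mp (Nat.le_zero.mp hn)
      subst this; rw [msortB]; simp
  | succ n ih =>
      intro idxs hn
      rw [msortB]
      split_ifs with h
      · exact List.Perm.refl _
      · have h2 : 2 ≤ idxs.length := by omega
        have p1 := ih (idxs.take (idxs.length / 2)) (by simp [List.length_take]; omega)
        have p2 := ih (idxs.drop (idxs.length / 2)) (by simp [List.length_drop]; omega)
        exact ((mergeB_perm weights _ _).trans (p1.append p2)).trans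
          (by rw [List.take_append_drop])

theorem msortB_pairwise (weights : List Int) : ∀ (n : Nat) (idxs : List Int),
    idxs.length ≤ n →
    (msortB weights idxs).Pairwise (fun a b => keyB weights a ≤ keyB weights b) := by
  intro n
  induction n with
  | zero =>
      intro idxs hn
      have : idxs = [] := List.length_eq_zero_iff.mp (Nat.le_zero.mp hn)
      subst this; rw [msortB]; simp
  | succ n ih =>
      intro idxs hn
      rw [msortB]
      split_ifs with h
      · match idxs, h with
        | [], _ => simp
        | [x], _ => simp
      · exact mergeB_pairwise weights _ _
          (ih _ (by simp [List.length_take]; omega))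
          (ih _ (by simp [List.length_drop]; omega))

theorem keyB_injective (weights : List Int) : Function.Injective (keyB weights) := by
  intro a b hab
  have := congrArg (fun x => (ofLex x).2) hab
  simpa [keyB] using this

-- B's order is a strictly keyB-increasing rearrangement of range(len(weights))
theorem order_perm (weights : List Int) :
    (msortB weights (PySem.List.pyRange 0 (weights.length : Int) 1)).Perm
      (PySem.List.pyRange 0 (weights.length : Int) 1) :=
  msortB_perm weights _ _ le_rfl

theorem order_pairwise_lt (weights : List Int) :
    (msortB weights (PySem.List.pyRange 0 (weights.length : Int) 1)).Pairwise
      (fun a b => keyB weights a < keyB weights b) := by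
  have hle := msortB_pairwise weights _ (PySem.List.pyRange 0 (weights.length : Int) 1) le_rfl
  have hnd : (msortB weights (PySem.List.pyRange 0 (weights.length : Int) 1)).Nodup :=
    (order_perm weights).nodup_iff.mpr (PySem.List.nodup_pyRange_one 0 _)
  refine (hle.and hnd).imp ?_
  rintro a b ⟨hab, hne⟩
  exact lt_of_le_of_ne hab (fun e => hne (keyB_injective weights e))

-- ---- A side: A's stable sort by first component is the sort by the lex pair key ----

theorem insertBy_congr_pv {α : Type} (b₁ b₂ : α → α → Bool) (x : α) (l : List α)
    (h : ∀ y ∈ l, b₁ x y = b₂ x y) :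
    PySem.List.insertBy b₁ x l = PySem.List.insertBy b₂ x l := by
  induction l with
  | nil => rfl
  | cons y ys ih =>
      have hy := h y (by simp)
      simp only [PySem.List.insertBy, hy]
      by_cases h2 : b₂ x y = true
      · simp [h2]
      · simp [h2, ih fun z hz => h z (by simp [hz])]

theorem lex_lt_iff_fst_lt (x y : Int × Int) (h : y.2 < x.2) :
    (toLex (x.1, x.2) < toLex (y.1, y.2)) ↔ x.1 < y.1 := by
  rw [Prod.Lex.lt_iff]
  constructor
  · rintro (hlt | ⟨heq, hlt⟩)
    · simpa using hlt
    · simp only [ofLex_toLex] at heq hlt; omega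
  · intro hlt; left; simpa using hlt

theorem foldl_insert_fst_eq_lex (L : List (Int × Int)) :
    ∀ acc : List (Int × Int), L.Pairwise (fun a b => a.2 < b.2) →
    (∀ y ∈ acc, ∀ x ∈ L, y.2 < x.2) →
    L.foldl (fun a x => PySem.List.insertBy (fun p q => decide (p.1 < q.1)) x a) acc
      = L.foldl (fun a x => PySem.List.insertBy (fun p q => decide (toLex (p.1, p.2) < toLex (q.1, q.2))) x a) acc := by
  induction L with
  | nil => intro acc _ _; rfl
  | cons x L' ih =>
      intro acc hL hacc
      have hpw := List.pairwise_cons.mp hL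
      have hstep : PySem.List.insertBy (fun p q => decide (p.1 < q.1)) x acc
          = PySem.List.insertBy (fun p q => decide (toLex (p.1, p.2) < toLex (q.1, q.2))) x acc := by
        apply insertBy_congr_pv
        intro y hy
        simp [lex_lt_iff_fst_lt x y (hacc y hy x (by simp))]
      simp only [List.foldl_cons, hstep]
      refine ih _ hpw.2 ?_
      intro y hy z hz
      rcases (PySem.List.mem_insertBy _ _ _ _).mp hy with h | h
      · subst h; exact hpw.1 z hz
      · exact lt_trans (hacc y h x (by simp)) (hpw.1 z hz)

theorem sorted_fst_eq_sorted_lex (L : List (Int × Int))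
    (hL : L.Pairwise (fun a b => a.2 < b.2)) :
    PySem.List.sorted L (fun p => p.1) false
      = PySem.List.sorted L (fun p => toLex (p.1, p.2)) false := by
  simpa [PySem.List.sorted_eq_foldl_insertBy] using foldl_insert_fst_eq_lex L [] hL (by simp)

-- the decorated pairs have strictly increasing second components
theorem pairs_pairwise (xs : List Int) :
    ((PySem.List.pyRange 0 (xs.length : Int) 1).map
      (fun i => (PySem.List.pyGetD xs i 0, i))).Pairwise (fun a b => a.2 < b.2) := by
  refine List.pairwise_map.mpr ?_
  exact (PySem.List.pairwise_lt_pyRange_one 0 _).imp (fun h => h)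

-- ===== VERDICT (by name: the statement is the Claim_ definition above) =====
theorem sortEdges_spec : Claim_equal_sortEdges := by
  intro weights _
  unfold Spec_sortEdges
  simp only [sortEdges, sortEdges_alt, PySem.List.foldl_append_singleton_eq_map, List.nil_append]
  set P := (PySem.List.pyRange 0 (weights.length : Int) 1).map
      (fun idx => (PySem.List.pyGetD weights idx 0, idx)) with hP
  set S := PySem.List.sorted P (fun x : Int × Int => x.1) false with hS
  -- A's read-out loop is map snd over S
  have hread : (PySem.List.pyRange 0 (weights.length : Int) 1).map
        (fun idx => (PySem.List.pyGetD S idx (0, 0)).2)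
      = S.map (fun p => p.2) := by
    have hlen : (weights.length : Int) = (S.length : Int) := by
      rw [hS, PySem.List.length_sorted, hP, List.length_map, PySem.List.length_pyRange_one]
      simp
    calc (PySem.List.pyRange 0 (weights.length : Int) 1).map
          (fun idx => (PySem.List.pyGetD S idx (0, 0)).2)
        = ((PySem.List.pyRange 0 (weights.length : Int) 1).map
            (fun idx => PySem.List.pyGetD S idx (0, 0))).map (fun p => p.2) := by
          rw [List.map_map]; rfl
      _ = S.map (fun p => p.2) := by rw [hlen, PySem.List.map_pyGetD_pyRange_zero']
  rw [hread]
  -- name B's order and decorate it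
  set ord := msortB weights (PySem.List.pyRange 0 (weights.length : Int) 1) with hord
  -- S, sorted by the lex key, IS the decorated order: it is a strictly lex-increasing
  -- rearrangement of P
  have hSlex : S = PySem.List.sorted P (fun p : Int × Int => toLex (p.1, p.2)) false := by
    rw [hS, sorted_fst_eq_sorted_lex P (hP ▸ pairs_pairwise weights)]
  have hperm : (ord.map (fun j => (PySem.List.pyGetD weights j 0, j))).Perm P := by
    rw [hP]
    exact (order_perm weights).map _
  have hpwlt : (ord.map (fun j => (PySem.List.pyGetD weights j 0, j))).Pairwise
      (fun a b => toLex (a.1, a.2) < toLex (b.1, b.2)) := by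
    refine List.pairwise_map.mpr ?_
    exact (order_pairwise_lt weights).imp (fun h => by simpa [keyB] using h)
  have hSeq : S = ord.map (fun j => (PySem.List.pyGetD weights j 0, j)) := by
    rw [hSlex]
    exact PySem.List.sorted_eq_of_perm_of_pairwise_lt _ _ _ hperm hpwlt
  rw [hSeq, List.map_map]
  have hid : ((fun p : Int × Int => p.2) ∘ fun j : Int => (PySem.List.pyGetD weights j 0, j))
      = fun j => j := by funext j; rfl
  rw [hid, List.map_id']
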